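-- pv_equiv track=rewrite | github.com/jeffliulab/vis-inject | attack/steganography.py | _text_to_bits
-- ===== SOURCE A (Python) =====
-- def _text_to_bits(text: str) -> list[int]:
--     """Convert text string to list of bits (UTF-8 encoding)."""
--     data = text.encode("utf-8")
--     # Prepend length as 32-bit integer for extraction
--     length = len(data)
--     header = length.to_bytes(4, "big")
--     payload = header + data
--     bits = []
--     for byte in payload:
--         for i in range(7, -1, -1):
--             bits.append((byte >> i) & 1)
--     return bits
-- ===== SOURCE B (Python) =====
-- def _text_to_bits(text: str) -> list[int]:
--     """Convert text string to list of bits (UTF-8 encoding)."""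
--     data = text.encode("utf-8")
--     payload = len(data).to_bytes(4, "big") + data
--     n = int.from_bytes(payload, "big")
--     width = 8 * len(payload)
--     return [int(c) for c in format(n, "0" + str(width) + "b")]
-- ===== Notes on version B (the rewrite author's own statement) =====
-- stated objective: idiomatic
-- what changed: B reinterprets the whole payload byte string as one big integer (int.from_bytes) and emits its zero-padded binary string representation, replacing A's nested per-byte/per-bit shift-and-mask loops.
import Mathlib
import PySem

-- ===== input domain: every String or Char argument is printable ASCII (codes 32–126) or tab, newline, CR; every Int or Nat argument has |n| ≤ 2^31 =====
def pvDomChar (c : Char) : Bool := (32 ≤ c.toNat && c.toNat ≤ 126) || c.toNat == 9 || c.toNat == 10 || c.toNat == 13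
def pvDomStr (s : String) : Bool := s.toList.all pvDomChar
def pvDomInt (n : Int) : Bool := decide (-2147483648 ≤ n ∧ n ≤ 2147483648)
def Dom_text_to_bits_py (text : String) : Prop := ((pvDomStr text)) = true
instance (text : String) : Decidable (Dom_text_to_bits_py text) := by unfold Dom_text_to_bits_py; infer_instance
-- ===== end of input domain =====

-- B reinterprets the payload bytes as one big integer and formats it as a zero-padded
-- binary string, instead of A's nested per-byte / per-bit shift-and-mask loops (idiomatic, not faster).


-- ===== PORT A =====
-- utf-8 encode: exact on the ASCII domain (all admitted chars are < 128, one byte = code point)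
def text_to_bits_py (text : String) : List Int :=
  let data : List Nat := text.toList.map (fun c => c.toNat)
  let length : Nat := data.length
  -- length.to_bytes(4, "big"); exact for 0 ≤ length < 2^32 (length is a list length, nonneg)
  let header : List Nat := [length / 16777216 % 256, length / 65536 % 256, length / 256 % 256, length % 256]
  let payload : List Nat := header ++ data
  payload.foldl (fun bits byte =>
    (PySem.List.pyRange 7 (-1) (-1)).foldl
      (fun bits i => bits ++ [(((byte >>> i.toNat) &&& 1 : Nat) : Int)]) bits) []

-- ===== PORT B =====
-- core of format(n, "b"): binary digits of n, most significant first ([] for n = 0)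
def pvBinDigits (n : Nat) : List Nat :=
  if n = 0 then [] else pvBinDigits (n / 2) ++ [n % 2]
decreasing_by exact Nat.div_lt_self (Nat.pos_of_ne_zero (by assumption)) (by norm_num)

def text_to_bits_py_alt (text : String) : List Int :=
  let data : List Nat := text.toList.map (fun c => c.toNat)  -- utf-8 encode; exact on the ASCII domain
  -- len(data).to_bytes(4,"big") + data
  let payload : List Nat :=
    [data.length / 16777216 % 256, data.length / 65536 % 256, data.length / 256 % 256,
     data.length % 256] ++ data
  let n : Nat := payload.foldl (fun a b => 256 * a + b) 0   -- int.from_bytes(payload, "big")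
  let width : Nat := 8 * payload.length
  let s : List Nat := if n = 0 then [0] else pvBinDigits n  -- format(n, "b")
  -- zero-pad to width, digits to ints
  (List.replicate (width - s.length) 0 ++ s).map (fun (d : Nat) => (d : Int))

-- ===== PRECONDITION & SPEC =====
def Spec_text_to_bits_py (text : String) (out : List Int) : Prop := out = text_to_bits_py_alt text
instance (text : String) (out : List Int) : Decidable (Spec_text_to_bits_py text out) := by unfold Spec_text_to_bits_py; infer_instance

-- ===== CLAIM (what is proved, stated in full; the proofs are below) =====
def Claim_equal_text_to_bits_py : Prop := ∀ (text : String), Dom_text_to_bits_py text → Spec_text_to_bits_py text (text_to_bits_py text)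

-- ===== LEMMAS AND PROOFS =====

/-- MSB-first bit vector of width `w` of `n` (reference form both ports reduce to). -/
def pvBitsOf : Nat → Nat → List Nat
  | 0, _ => []
  | w + 1, n => pvBitsOf w (n / 2) ++ [n % 2]

def pvByteBits (b : Nat) : List Nat :=
  [b / 128 % 2, b / 64 % 2, b / 32 % 2, b / 16 % 2, b / 8 % 2, b / 4 % 2, b / 2 % 2, b % 2]

theorem pvBitsOf_zero (w : Nat) : pvBitsOf w 0 = List.replicate w 0 := by
  induction w with
  | zero => rfl
  | succ w ih => simp [pvBitsOf, ih, List.replicate_succ']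

theorem pvBitsOf_add8 (w v b : Nat) (hb : b < 256) :
    pvBitsOf (w + 8) (256 * v + b) = pvBitsOf w v ++ pvByteBits b := by
  show pvBitsOf (w+7+1) _ = _
  simp only [pvBitsOf, pvByteBits]
  have h256 : (256 * v + b) / 2 / 2 / 2 / 2 / 2 / 2 / 2 / 2 = v := by omega
  rw [show (256*v+b)/2/2/2/2/2/2/2/2 = v by omega]
  simp only [List.append_assoc, List.cons_append, List.nil_append, List.append_cancel_left_eq]
  refine List.cons_eq_cons.mpr ⟨by omega, ?_⟩
  refine List.cons_eq_cons.mpr ⟨by omega, ?_⟩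
  refine List.cons_eq_cons.mpr ⟨by omega, ?_⟩
  refine List.cons_eq_cons.mpr ⟨by omega, ?_⟩
  refine List.cons_eq_cons.mpr ⟨by omega, ?_⟩
  refine List.cons_eq_cons.mpr ⟨by omega, ?_⟩
  refine List.cons_eq_cons.mpr ⟨by omega, ?_⟩
  exact List.cons_eq_cons.mpr ⟨by omega, rfl⟩

theorem pvFlatMap_eq_bitsOf (p : List Nat) (hp : ∀ b ∈ p, b < 256) :
    p.flatMap pvByteBits = pvBitsOf (8 * p.length) (p.foldl (fun a b => 256 * a + b) 0) := by
  induction p using List.reverseRecOn with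
  | nil => rfl
  | append_singleton p b ih =>
    have hb : b < 256 := hp b (by simp)
    have hp' : ∀ x ∈ p, x < 256 := fun x hx => hp x (by simp [hx])
    rw [List.flatMap_append, ih hp', List.foldl_append]
    simp only [List.flatMap_cons, List.flatMap_nil, List.append_nil, List.foldl_cons,
      List.foldl_nil, List.length_append, List.length_cons, List.length_nil]
    rw [show 8 * (p.length + (0 + 1)) = 8 * p.length + 8 by ring]
    exact (pvBitsOf_add8 _ _ _ hb).symm

theorem pvVal_lt (p : List Nat) (hp : ∀ b ∈ p, b < 256) :
    p.foldl (fun a b => 256 * a + b) 0 < 2 ^ (8 * p.length) := by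
  induction p using List.reverseRecOn with
  | nil => simp
  | append_singleton p b ih =>
    have hb : b < 256 := hp b (by simp)
    have hp' : ∀ x ∈ p, x < 256 := fun x hx => hp x (by simp [hx])
    have h := ih hp'
    rw [List.foldl_append]
    simp only [List.foldl_cons, List.foldl_nil, List.length_append, List.length_cons,
      List.length_nil]
    rw [show 8 * (p.length + (0 + 1)) = 8 * p.length + 8 by ring, pow_add]
    have : (2:Nat)^8 = 256 := by norm_num
    rw [this]
    nlinarith [h, hb]

theorem pvBitsOf_length (w n : Nat) : (pvBitsOf w n).length = w := by
  induction w generalizing n with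
  | zero => rfl
  | succ w ih => simp [pvBitsOf, ih]

theorem pvBitsOf_eq_pad (w n : Nat) (hn : 0 < n) (hw : n < 2 ^ w) :
    pvBitsOf w n = List.replicate (w - (pvBinDigits n).length) 0 ++ pvBinDigits n := by
  induction w generalizing n with
  | zero => omega
  | succ w ih =>
    show pvBitsOf w (n / 2) ++ [n % 2] = _
    rw [pvBinDigits]
    simp only [Nat.pos_iff_ne_zero.mp hn, if_false]
    by_cases h2 : n / 2 = 0
    · have hn1 : n = 1 := by omega
      subst hn1
      simp [pvBitsOf_zero, pvBinDigits]
    · have hlt : n / 2 < 2 ^ w := by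
        have : (2:Nat) ^ (w+1) = 2 * 2 ^ w := by ring
        omega
      have := ih (n / 2) (Nat.pos_of_ne_zero h2) hlt
      rw [this]
      have hlen : (pvBinDigits (n / 2)).length ≤ w := by
        have hL := pvBitsOf_length w (n / 2)
        rw [this] at hL
        simp at hL
        omega
      rw [List.length_append, List.length_singleton]
      rw [show w + 1 - ((pvBinDigits (n/2)).length + 1) = w - (pvBinDigits (n/2)).length by omega]
      simp [List.append_assoc]

/-- A's inner loop over range(7,-1,-1) appends exactly the 8 bits of the byte. -/
theorem pvInner_eq (acc : List Int) (b : Nat) :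
    (PySem.List.pyRange 7 (-1) (-1)).foldl
      (fun bits i => bits ++ [(((b >>> i.toNat) &&& 1 : Nat) : Int)]) acc
    = acc ++ (pvByteBits b).map (fun (d : Nat) => (d : Int)) := by
  have hr : PySem.List.pyRange 7 (-1) (-1) = [7, 6, 5, 4, 3, 2, 1, 0] := by decide
  rw [hr]
  simp only [List.foldl_cons, List.foldl_nil, pvByteBits]
  simp [Nat.shiftRight_eq_div_pow, Nat.and_one_is_mod, List.append_assoc]

theorem pvA_eq (p : List Nat) :
    p.foldl (fun bits byte =>
      (PySem.List.pyRange 7 (-1) (-1)).foldl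
        (fun bits i => bits ++ [(((byte >>> i.toNat) &&& 1 : Nat) : Int)]) bits) []
    = (p.flatMap pvByteBits).map (fun (d : Nat) => (d : Int)) := by
  have : (fun (bits : List Int) (byte : Nat) =>
      (PySem.List.pyRange 7 (-1) (-1)).foldl
        (fun bits i => bits ++ [(((byte >>> i.toNat) &&& 1 : Nat) : Int)]) bits)
      = fun bits byte => bits ++ (pvByteBits byte).map (fun (d : Nat) => (d : Int)) := by
    funext bits byte; exact pvInner_eq bits byte
  rw [this, PySem.List.foldl_append_eq_flatMap, List.nil_append, List.map_flatMap]

set_option maxHeartbeats 1000000 in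
/-- Both port bodies, over an arbitrary byte list `data`, agree. -/
theorem pvPorts_eq (data : List Nat) (hd : ∀ b ∈ data, b < 256) :
    (([data.length / 16777216 % 256, data.length / 65536 % 256, data.length / 256 % 256,
       data.length % 256] ++ data).foldl (fun bits byte =>
        (PySem.List.pyRange 7 (-1) (-1)).foldl
          (fun bits i => bits ++ [(((byte >>> i.toNat) &&& 1 : Nat) : Int)]) bits) [])
    = (List.replicate
        (8 * (([data.length / 16777216 % 256, data.length / 65536 % 256, data.length / 256 % 256,
            data.length % 256] ++ data).length)
          - (if (([data.length / 16777216 % 256, data.length / 65536 % 256, data.length / 256 % 256,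
              data.length % 256] ++ data).foldl (fun a b => 256 * a + b) 0) = 0 then [0]
             else pvBinDigits (([data.length / 16777216 % 256, data.length / 65536 % 256,
              data.length / 256 % 256, data.length % 256] ++ data).foldl
                (fun a b => 256 * a + b) 0)).length) 0
        ++ (if (([data.length / 16777216 % 256, data.length / 65536 % 256, data.length / 256 % 256,
              data.length % 256] ++ data).foldl (fun a b => 256 * a + b) 0) = 0 then [0]
            else pvBinDigits (([data.length / 16777216 % 256, data.length / 65536 % 256,
              data.length / 256 % 256, data.length % 256] ++ data).foldl
                (fun a b => 256 * a + b) 0))).map (fun (d : Nat) => (d : Int)) := by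
  set payload : List Nat :=
    [data.length / 16777216 % 256, data.length / 65536 % 256, data.length / 256 % 256,
     data.length % 256] ++ data with hpayload
  have hbytes : ∀ b ∈ payload, b < 256 := by
    intro b hb
    rw [hpayload] at hb
    simp only [List.mem_append, List.mem_cons, List.not_mem_nil, or_false] at hb
    rcases hb with (rfl | rfl | rfl | rfl) | h
    · omega
    · omega
    · omega
    · omega
    · exact hd b h
  set n : Nat := payload.foldl (fun a b => 256 * a + b) 0 with hn
  rw [pvA_eq payload, pvFlatMap_eq_bitsOf payload hbytes, ← hn]
  refine congrArg (List.map (fun (d : Nat) => (d : Int))) ?_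
  have hwlen : 1 ≤ payload.length := by rw [hpayload]; simp
  by_cases h0 : n = 0
  · rw [h0, pvBitsOf_zero, if_pos rfl]
    have h1 : 8 * payload.length - 1 + 1 = 8 * payload.length := by omega
    rw [List.length_singleton, ← List.replicate_succ', h1]
  · rw [if_neg h0]
    exact pvBitsOf_eq_pad _ n (Nat.pos_of_ne_zero h0) (pvVal_lt payload hbytes)

-- ===== VERDICT (by name: the statement is the Claim_ definition above) =====
set_option maxHeartbeats 1000000 in
theorem text_to_bits_py_spec : Claim_equal_text_to_bits_py := by
  intro text hdom
  show text_to_bits_py text = text_to_bits_py_alt text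
  have hd : ∀ b ∈ text.toList.map (fun c => c.toNat), b < 256 := by
    intro b hb
    simp only [List.mem_map] at hb
    obtain ⟨c, hc, rfl⟩ := hb
    have := List.all_eq_true.mp hdom c hc
    simp only [pvDomChar, Bool.or_eq_true, Bool.and_eq_true, decide_eq_true_eq,
      beq_iff_eq] at this
    omega
  simp only [text_to_bits_py, text_to_bits_py_alt]
  rw [pvPorts_eq (text.toList.map (fun c => c.toNat)) hd]
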